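-- pv_equiv track=rewrite | github.com/tim777000/LeetCode | Weekly_Contest/Weekly_Contest_274/5969_Destroying_Asteroids.py | asteroidsDestroyed
-- ===== SOURCE A (Python) =====
-- from typing import List
--
-- def asteroidsDestroyed(mass: int, asteroids: List[int]) -> bool:
--     answer = True
--     sorted_asteroids = sorted(asteroids)
--     for index, asteroid in enumerate(sorted_asteroids):
--         if mass >= asteroid:
--             mass += asteroid
--         else:
--             answer = False
--
--     return answer
-- ===== SOURCE B (Python) =====
-- def asteroidsDestroyed(mass, asteroids):
--     s = sorted(asteroids)
--     prefix = [mass]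
--     for a in s:
--         prefix.append(prefix[-1] + a)
--     return all(p >= a for p, a in zip(prefix, s))
-- ===== Notes on version B (the rewrite author's own statement) =====
-- stated objective: alternative
-- what changed: Replaces the in-loop running accumulator with an in-place answer flag by an explicit prefix-sum table built in one pass followed by a separate all() comparison pass over zip(prefix, sorted list).
import Mathlib
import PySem

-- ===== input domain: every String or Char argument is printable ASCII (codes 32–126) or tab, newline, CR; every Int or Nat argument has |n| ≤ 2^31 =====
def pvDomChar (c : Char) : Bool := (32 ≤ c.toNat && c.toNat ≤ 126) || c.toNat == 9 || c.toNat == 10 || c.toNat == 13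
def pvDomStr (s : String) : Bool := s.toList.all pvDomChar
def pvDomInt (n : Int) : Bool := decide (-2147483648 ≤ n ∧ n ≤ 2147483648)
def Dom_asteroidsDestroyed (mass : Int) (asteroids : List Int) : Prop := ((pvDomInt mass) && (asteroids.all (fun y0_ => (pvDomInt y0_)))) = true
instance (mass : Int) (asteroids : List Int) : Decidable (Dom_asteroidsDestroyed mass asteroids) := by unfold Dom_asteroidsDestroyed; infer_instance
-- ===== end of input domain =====

-- B builds an explicit prefix-sum table then checks it in a second pass; same return value as A (alternative decomposition, not faster).


-- ===== PORT A =====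
def asteroidsDestroyed (mass : Int) (asteroids : List Int) : Bool :=
  let sorted_asteroids := PySem.List.sorted asteroids (fun x => x) false
  (sorted_asteroids.foldl
    (fun (st : Int × Bool) asteroid =>
      if st.1 ≥ asteroid then (st.1 + asteroid, st.2) else (st.1, false))
    (mass, true)).2

-- ===== PORT B =====
-- prefix[i] = mass + sum of the first i sorted asteroids (the accumulate/append loop of Source B)
def pvBuildPrefix (m : Int) : List Int → List Int
  | [] => [m]
  | a :: rest => m :: pvBuildPrefix (m + a) rest

def asteroidsDestroyed_alt (mass : Int) (asteroids : List Int) : Bool :=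
  let s := PySem.List.sorted asteroids (fun x => x) false
  let pre := pvBuildPrefix mass s
  (pre.zip s).all (fun pa => pa.1 ≥ pa.2)

-- ===== PRECONDITION & SPEC =====
def Spec_asteroidsDestroyed (mass : Int) (asteroids : List Int) (out : Bool) : Prop := out = asteroidsDestroyed_alt mass asteroids
instance (mass : Int) (asteroids : List Int) (out : Bool) : Decidable (Spec_asteroidsDestroyed mass asteroids out) := by unfold Spec_asteroidsDestroyed; infer_instance

-- ===== CLAIM (what is proved, stated in full; the proofs are below) =====
def Claim_equal_asteroidsDestroyed : Prop := ∀ (mass : Int) (asteroids : List Int), Dom_asteroidsDestroyed mass asteroids → Spec_asteroidsDestroyed mass asteroids (asteroidsDestroyed mass asteroids)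

-- ===== LEMMAS AND PROOFS =====
theorem pvFoldFalse (s : List Int) (m : Int) :
    (s.foldl (fun (st : Int × Bool) a =>
      if st.1 ≥ a then (st.1 + a, st.2) else (st.1, false)) (m, false)).2 = false := by
  induction s generalizing m with
  | nil => rfl
  | cons a rest ih =>
    simp only [List.foldl]
    by_cases h : m ≥ a <;> simp [h, ih]

theorem pvMain (s : List Int) (m : Int) :
    (s.foldl (fun (st : Int × Bool) a =>
      if st.1 ≥ a then (st.1 + a, st.2) else (st.1, false)) (m, true)).2
    = ((pvBuildPrefix m s).zip s).all (fun pa => pa.1 ≥ pa.2) := by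
  induction s generalizing m with
  | nil => rfl
  | cons a rest ih =>
    simp only [List.foldl, pvBuildPrefix, List.zip_cons_cons, List.all_cons]
    by_cases h : m ≥ a
    · simp [h, ih]
    · simp [h, pvFoldFalse]

-- ===== VERDICT (by name: the statement is the Claim_ definition above) =====
theorem asteroidsDestroyed_spec : Claim_equal_asteroidsDestroyed := by
  intro mass asteroids _
  unfold Spec_asteroidsDestroyed asteroidsDestroyed asteroidsDestroyed_alt
  exact pvMain _ mass
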